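-- pv_equiv track=rewrite | github.com/tgycmzwj/leetcode | q562/main.py | longestLine
-- ===== SOURCE A (Python) =====
-- from typing import List
--
-- def longestLine(mat: List[List[int]]) -> int:
--     #horizontal, vertical, diagonal, antidiagonal
--     dp=[[[0,0,0,0] for i in range(len(mat[0]))] for j in range(len(mat))]
--     for i in range(len(mat)):
--         for j in range(len(mat[0])):
--             if mat[i][j]==1:
--                 #horizontal
--                 if j==0:dp[i][j][0]=1
--                 else:dp[i][j][0]=dp[i][j-1][0]+1
--                 #vertical
--                 if i==0:dp[i][j][1]=1
--                 else:dp[i][j][1]=dp[i-1][j][1]+1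
--                 #diagonal
--                 if i==0 or j==0:dp[i][j][2]=1
--                 else:dp[i][j][2]=dp[i-1][j-1][2]+1
--                 #antidiagonal
--                 if i==0 or j==len(mat[0])-1:dp[i][j][3]=1
--                 else:dp[i][j][3]=dp[i-1][j+1][3]+1
--     return max([max(arr) for eles in dp for arr in eles])
-- ===== SOURCE B (Python) =====
-- def longestLine(mat):
--     w = len(mat[0])
--     dirs = ((0, 1), (1, 0), (1, 1), (1, -1))
--
--     def run(i, j, di, dj):
--         # length of the run of 1s ending at (i, j), walking backwards along (di, dj)
--         c = 0
--         while i >= 0 and 0 <= j < w and mat[i][j] == 1: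
--             c += 1
--             i -= di
--             j -= dj
--         return c
--
--     return max(run(i, j, di, dj)
--                for i in range(len(mat))
--                for j in range(w)
--                for di, dj in dirs)
-- ===== Notes on version B (the rewrite author's own statement) =====
-- stated objective: simpler
-- what changed: Replaced the O(n*m) 4-component DP table with a table-free per-cell backward scan: for each cell and each of the four directions, count the run of 1s ending there directly, taking the max over all cells and directions.
import Mathlib
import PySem

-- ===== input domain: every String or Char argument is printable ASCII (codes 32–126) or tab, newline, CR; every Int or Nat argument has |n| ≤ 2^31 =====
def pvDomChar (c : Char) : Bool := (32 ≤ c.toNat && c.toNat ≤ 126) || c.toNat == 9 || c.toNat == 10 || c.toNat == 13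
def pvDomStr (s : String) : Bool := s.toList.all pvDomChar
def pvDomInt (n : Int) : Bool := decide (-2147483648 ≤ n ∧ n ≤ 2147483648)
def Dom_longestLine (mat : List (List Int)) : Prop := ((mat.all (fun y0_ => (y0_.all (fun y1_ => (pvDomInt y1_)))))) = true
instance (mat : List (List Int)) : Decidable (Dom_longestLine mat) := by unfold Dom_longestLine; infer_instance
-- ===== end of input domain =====

-- B drops A's 4-component DP table for a table-free per-cell backward run scan (same value, not faster).

-- ===== PORT A =====
-- Literal port of A's DP. `mat[i][j]` / `dp[i][j]` with loop indices from range(...) are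
-- in range under Pre_ (and nonnegative), so they are ported as `List.getD` on Nat indices
-- (exact there); the final `max(list)` is PySem.List.max?, totalized with .getD 0 — Pre_
-- excludes the empty-cell matrices on which Python's max raises.
def longestLine (mat : List (List Int)) : Int :=
  let n := mat.length
  let w := mat.headI.length
  let dp0 : List (List (List Int)) :=
    (List.range n).map (fun _ => (List.range w).map (fun _ => ([0, 0, 0, 0] : List Int)))
  let dp := (List.range n).foldl (fun dp i =>
    (List.range w).foldl (fun dp j =>
      if (mat.getD i []).getD j 0 = 1 then
        let row := dp.getD i []
        let prevRow := dp.getD (i - 1) []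
        let h : Int := if j = 0 then 1 else (row.getD (j - 1) []).getD 0 0 + 1
        let v : Int := if i = 0 then 1 else (prevRow.getD j []).getD 1 0 + 1
        let d : Int := if i = 0 ∨ j = 0 then 1 else (prevRow.getD (j - 1) []).getD 2 0 + 1
        let a : Int := if i = 0 ∨ j = w - 1 then 1 else (prevRow.getD (j + 1) []).getD 3 0 + 1
        dp.set i (row.set j [h, v, d, a])
      else dp) dp) dp0
  (PySem.List.max?
      (dp.flatMap (fun eles => eles.map (fun arr => (PySem.List.max? arr (fun x => x)).getD 0)))
      (fun x => x)).getD 0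

-- ===== PORT B =====
-- B's while loop `while i >= 0 and 0 <= j < w and mat[i][j] == 1`: fuel-based recursion;
-- fuel n+w is enough for every direction B uses (i or j strictly decreases towards its bound).
def pvRunLen (mat : List (List Int)) (w : Nat) (di dj : Int) : Nat → Int → Int → Int
  | 0, _, _ => 0
  | fuel + 1, i, j =>
    if 0 ≤ i ∧ 0 ≤ j ∧ j < (w : Int) ∧ (mat.getD i.toNat []).getD j.toNat 0 = 1
    then 1 + pvRunLen mat w di dj fuel (i - di) (j - dj)
    else 0

def longestLine_alt (mat : List (List Int)) : Int :=
  let w := mat.headI.length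
  let fuel := mat.length + w
  let vals := (List.range mat.length).flatMap (fun (i : Nat) =>
    (List.range w).flatMap (fun (j : Nat) =>
      ([(0, 1), (1, 0), (1, 1), (1, -1)] : List (Int × Int)).map (fun d =>
        pvRunLen mat w d.1 d.2 fuel (i : Int) (j : Int))))
  (PySem.List.max? vals (fun x => x)).getD 0

-- ===== PRECONDITION & SPEC =====
-- Pre_ excludes exactly the inputs where Python A raises: mat == [] (ValueError: max of
-- empty), a first row [] (ValueError), and a row shorter than mat[0] (IndexError).
def Pre_longestLine (mat : List (List Int)) : Prop :=
  mat ≠ [] ∧ 0 < mat.headI.length ∧ ∀ row ∈ mat, mat.headI.length ≤ row.length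
instance (mat : List (List Int)) : Decidable (Pre_longestLine mat) := by
  unfold Pre_longestLine; infer_instance
def pvWitness_longestLine : List (List Int) := [[1, 0], [1, 1]]

def Spec_longestLine (mat : List (List Int)) (out : Int) : Prop := out = longestLine_alt mat
instance (mat : List (List Int)) (out : Int) : Decidable (Spec_longestLine mat out) := by
  unfold Spec_longestLine; infer_instance

-- ===== CLAIM (what is proved, stated in full; the proofs are below) =====
def Claim_equal_longestLine : Prop :=
  ∀ (mat : List (List Int)), Dom_longestLine mat → Pre_longestLine mat →
    Spec_longestLine mat (longestLine mat)

-- ===== LEMMAS AND PROOFS =====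

-- the matrix as a total function (what both ports read at in-range cells)
def pvG (mat : List (List Int)) (i j : Nat) : Int := (mat.getD i []).getD j 0

-- closed-form run lengths ending at (i, j) in the four directions
def pvH (g : Nat → Nat → Int) (i : Nat) : Nat → Int
  | 0 => if g i 0 = 1 then 1 else 0
  | j + 1 => if g i (j + 1) = 1 then pvH g i j + 1 else 0

def pvV (g : Nat → Nat → Int) : Nat → Nat → Int
  | 0, j => if g 0 j = 1 then 1 else 0
  | i + 1, j => if g (i + 1) j = 1 then pvV g i j + 1 else 0

def pvD (g : Nat → Nat → Int) : Nat → Nat → Int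
  | 0, j => if g 0 j = 1 then 1 else 0
  | i + 1, 0 => if g (i + 1) 0 = 1 then 1 else 0
  | i + 1, j + 1 => if g (i + 1) (j + 1) = 1 then pvD g i j + 1 else 0

def pvA (g : Nat → Nat → Int) (w : Nat) : Nat → Nat → Int
  | 0, j => if g 0 j = 1 then 1 else 0
  | i + 1, j => if g (i + 1) j = 1 then (if j = w - 1 then 1 else pvA g w i (j + 1) + 1) else 0

def pvF (g : Nat → Nat → Int) (w i j : Nat) : List Int :=
  [pvH g i j, pvV g i j, pvD g i j, pvA g w i j]

theorem pvH_eq (g : Nat → Nat → Int) (i j : Nat) :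
    pvH g i j = if g i j = 1 then (if j = 0 then 1 else pvH g i (j - 1) + 1) else 0 := by
  cases j <;> simp [pvH]

theorem pvV_eq (g : Nat → Nat → Int) (i j : Nat) :
    pvV g i j = if g i j = 1 then (if i = 0 then 1 else pvV g (i - 1) j + 1) else 0 := by
  cases i <;> simp [pvV]

theorem pvD_eq (g : Nat → Nat → Int) (i j : Nat) :
    pvD g i j = if g i j = 1 then (if i = 0 ∨ j = 0 then 1 else pvD g (i - 1) (j - 1) + 1) else 0 := by
  cases i <;> cases j <;> simp [pvD]

theorem pvA_eq (g : Nat → Nat → Int) (w i j : Nat) :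
    pvA g w i j = if g i j = 1 then (if i = 0 ∨ j = w - 1 then 1 else pvA g w (i - 1) (j + 1) + 1) else 0 := by
  cases i <;> by_cases hj : j = w - 1 <;> simp [pvA, hj]

theorem pvF_zero (g : Nat → Nat → Int) (w i j : Nat) (h : g i j ≠ 1) :
    pvF g w i j = [0, 0, 0, 0] := by
  simp [pvF, pvH_eq, pvV_eq, pvD_eq, pvA_eq, h]

-- table invariant: cells before (i, j) in scan order hold pvF, the rest [0,0,0,0]
def pvTab (g : Nat → Nat → Int) (n w : Nat) (dp : List (List (List Int))) (i j : Nat) : Prop :=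
  dp.length = n ∧ (∀ a, a < n → (dp.getD a []).length = w) ∧
  ∀ a b, a < n → b < w →
    (dp.getD a []).getD b [] = if a < i ∨ (a = i ∧ b < j) then pvF g w a b else [0, 0, 0, 0]

theorem getD_set {α : Type} (l : List α) (i : Nat) (x : α) (k : Nat) (d : α) :
    (l.set i x).getD k d = if k = i ∧ i < l.length then x else l.getD k d := by
  simp only [List.getD_eq_getElem?_getD, List.getElem?_set]
  split_ifs with h1 h2 h3 h4 <;> simp_all

-- A's loop body and row loop, named for the proofs (definitionally the fold bodies of port A)
def pvStep (mat : List (List Int)) (w i : Nat) (dp : List (List (List Int))) (j : Nat) :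
    List (List (List Int)) :=
  if (mat.getD i []).getD j 0 = 1 then
    let row := dp.getD i []
    let prevRow := dp.getD (i - 1) []
    let h : Int := if j = 0 then 1 else (row.getD (j - 1) []).getD 0 0 + 1
    let v : Int := if i = 0 then 1 else (prevRow.getD j []).getD 1 0 + 1
    let d : Int := if i = 0 ∨ j = 0 then 1 else (prevRow.getD (j - 1) []).getD 2 0 + 1
    let a : Int := if i = 0 ∨ j = w - 1 then 1 else (prevRow.getD (j + 1) []).getD 3 0 + 1
    dp.set i (row.set j [h, v, d, a])
  else dp

def pvOuter (mat : List (List Int)) (w : Nat) (dp : List (List (List Int))) (i : Nat) :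
    List (List (List Int)) :=
  (List.range w).foldl (pvStep mat w i) dp

theorem pvTab_step (mat : List (List Int)) (n w : Nat)
    (dp : List (List (List Int))) (i j : Nat) (hi : i < n) (hj : j < w)
    (h : pvTab (pvG mat) n w dp i j) :
    pvTab (pvG mat) n w (pvStep mat w i dp j) i (j + 1) := by
  obtain ⟨hlen, hrowlen, hent⟩ := h
  have hidp : i < dp.length := by omega
  by_cases hg : (mat.getD i []).getD j 0 = 1
  · rw [pvStep, if_pos hg]
    have hrw : (dp.getD i []).length = w := hrowlen i hi
    refine ⟨by simp [hlen], ?_, ?_⟩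
    · intro a ha
      rw [getD_set]
      by_cases hc : a = i ∧ i < dp.length
      · rw [if_pos hc]; simpa [List.length_set] using hrw
      · rw [if_neg hc]; exact hrowlen a ha
    · intro a b ha hb
      rw [getD_set]
      by_cases hai : a = i
      · subst hai
        rw [if_pos ⟨rfl, hidp⟩, getD_set]
        by_cases hbj : b = j
        · rw [if_pos ⟨hbj, by rw [hrowlen a ha]; omega⟩]
          subst hbj
          have hcond : (a < a ∨ (a = a ∧ b < b + 1)) := by omega
          rw [if_pos hcond]
          have hg' : pvG mat a b = 1 := hg
          have eH : (if b = 0 then (1:Int) else ((dp.getD a []).getD (b - 1) []).getD 0 0 + 1)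
              = pvH (pvG mat) a b := by
            rw [pvH_eq, if_pos hg']
            by_cases hb0 : b = 0
            · simp [hb0]
            · rw [if_neg hb0, if_neg hb0,
                hent a (b - 1) ha (by omega), if_pos (Or.inr ⟨rfl, by omega⟩)]
              simp [pvF]
          have eV : (if a = 0 then (1:Int) else ((dp.getD (a - 1) []).getD b []).getD 1 0 + 1)
              = pvV (pvG mat) a b := by
            rw [pvV_eq, if_pos hg']
            by_cases ha0 : a = 0
            · simp [ha0]
            · rw [if_neg ha0, if_neg ha0,
                hent (a - 1) b (by omega) hb, if_pos (Or.inl (by omega))]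
              simp [pvF]
          have eD : (if a = 0 ∨ b = 0 then (1:Int) else ((dp.getD (a - 1) []).getD (b - 1) []).getD 2 0 + 1)
              = pvD (pvG mat) a b := by
            rw [pvD_eq, if_pos hg']
            by_cases h0 : a = 0 ∨ b = 0
            · simp [h0]
            · rw [if_neg h0, if_neg h0,
                hent (a - 1) (b - 1) (by omega) (by omega), if_pos (Or.inl (by omega))]
              simp [pvF]
          have eA : (if a = 0 ∨ b = w - 1 then (1:Int) else ((dp.getD (a - 1) []).getD (b + 1) []).getD 3 0 + 1)
              = pvA (pvG mat) w a b := by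
            rw [pvA_eq, if_pos hg']
            by_cases h0 : a = 0 ∨ b = w - 1
            · simp [h0]
            · rw [if_neg h0, if_neg h0,
                hent (a - 1) (b + 1) (by omega) (by omega), if_pos (Or.inl (by omega))]
              simp [pvF]
          rw [eH, eV, eD, eA]
          rfl
        · rw [if_neg (by tauto), hent a b ha hb]
          by_cases hlt : b < j
          · rw [if_pos (Or.inr ⟨rfl, hlt⟩), if_pos (Or.inr ⟨rfl, by omega⟩)]
          · rw [if_neg (by omega), if_neg (by omega)]
      · rw [if_neg (by tauto), hent a b ha hb]
        by_cases hlt : a < i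
        · rw [if_pos (Or.inl hlt), if_pos (Or.inl hlt)]
        · rw [if_neg (by omega), if_neg (by omega)]
  · rw [pvStep, if_neg hg]
    refine ⟨hlen, hrowlen, ?_⟩
    intro a b ha hb
    rw [hent a b ha hb]
    by_cases hc : a < i ∨ (a = i ∧ b < j)
    · rw [if_pos hc, if_pos (by tauto)]
    · rw [if_neg hc]
      by_cases hc2 : a = i ∧ b < j + 1
      · obtain ⟨rfl, hb2⟩ := hc2
        have hbj : b = j := by omega
        subst hbj
        rw [if_pos (Or.inr ⟨rfl, by omega⟩), pvF_zero]
        exact fun h => hg h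
      · rw [if_neg (by tauto)]

theorem pvTab_inner (mat : List (List Int)) (n w : Nat) (i : Nat) (hi : i < n) :
    ∀ (c j : Nat), j + c = w →
    ∀ dp, pvTab (pvG mat) n w dp i j →
    pvTab (pvG mat) n w ((List.range' j c).foldl (pvStep mat w i) dp) i w := by
  intro c
  induction c with
  | zero => intro j hj dp h; simpa [show j = w by omega] using h
  | succ c ih =>
    intro j hj dp h
    rw [List.range'_succ, List.foldl_cons]
    exact ih (j + 1) (by omega) _ (pvTab_step mat n w dp i j hi (by omega) h)

theorem pvTab_last (g : Nat → Nat → Int) (n w : Nat) (dp : List (List (List Int))) (i : Nat)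
    (h : pvTab g n w dp i w) : pvTab g n w dp (i + 1) 0 := by
  obtain ⟨h1, h2, h3⟩ := h
  refine ⟨h1, h2, ?_⟩
  intro a b ha hb
  rw [h3 a b ha hb]
  by_cases hc : a < i ∨ (a = i ∧ b < w)
  · rw [if_pos hc, if_pos (by omega)]
  · rw [if_neg hc, if_neg (by omega)]

theorem pvTab_outer (mat : List (List Int)) (n w : Nat) :
    ∀ (c i : Nat), i + c = n →
    ∀ dp, pvTab (pvG mat) n w dp i 0 →
    pvTab (pvG mat) n w ((List.range' i c).foldl (pvOuter mat w) dp) n 0 := by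
  intro c
  induction c with
  | zero => intro i hi dp h; simpa [show i = n by omega] using h
  | succ c ih =>
    intro i hi dp h
    rw [List.range'_succ, List.foldl_cons]
    refine ih (i + 1) (by omega) _ ?_
    have h2 := pvTab_inner mat n w i (by omega) w 0 (by omega) dp h
    refine pvTab_last _ _ _ _ _ ?_
    rw [pvOuter, List.range_eq_range']
    exact h2

theorem pvRunLen_succ (mat : List (List Int)) (w : Nat) (di dj : Int) (f : Nat) (i j : Int) :
    pvRunLen mat w di dj (f + 1) i j =
    if 0 ≤ i ∧ 0 ≤ j ∧ j < (w : Int) ∧ (mat.getD i.toNat []).getD j.toNat 0 = 1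
    then 1 + pvRunLen mat w di dj f (i - di) (j - dj) else 0 := rfl

theorem pvRunLen_stop (mat : List (List Int)) (w : Nat) (di dj : Int) (f : Nat) (i j : Int)
    (h : ¬ (0 ≤ i ∧ 0 ≤ j)) :
    pvRunLen mat w di dj f i j = 0 := by
  cases f with
  | zero => rfl
  | succ f => rw [pvRunLen_succ, if_neg]; tauto

-- run-length scans of port B equal the closed forms
theorem pvRunLen_H (mat : List (List Int)) (w : Nat) :
    ∀ (j : Nat) (fuel : Nat) (i : Nat), j < fuel → j < w →
    pvRunLen mat w 0 1 fuel (i : Int) (j : Int) = pvH (pvG mat) i j := by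
  intro j
  induction j with
  | zero =>
    intro fuel i hf hw
    obtain ⟨f, rfl⟩ : ∃ f, fuel = f + 1 := ⟨fuel - 1, by omega⟩
    rw [pvRunLen_succ]
    have hstop : pvRunLen mat w 0 1 f ((i : Int) - 0) ((0 : Nat) - (1:Int)) = 0 :=
      pvRunLen_stop _ _ _ _ _ _ _ (by omega)
    by_cases hg : pvG mat i 0 = 1
    · rw [if_pos ⟨by positivity, by norm_num, by exact_mod_cast hw, by
        simpa [pvG] using hg⟩, hstop]
      simp [pvH, hg]
    · rw [if_neg (by simp [pvG] at hg; simp [hg])]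
      simp [pvH, hg]
  | succ j ih =>
    intro fuel i hf hw
    obtain ⟨f, rfl⟩ : ∃ f, fuel = f + 1 := ⟨fuel - 1, by omega⟩
    rw [pvRunLen_succ]
    by_cases hg : pvG mat i (j + 1) = 1
    · rw [if_pos ⟨by positivity, by positivity, by exact_mod_cast hw, by
        simpa [pvG] using hg⟩]
      have hc : ((j : Nat) + 1 : Nat) - (1 : Int) = ((j : Nat) : Int) := by push_cast; ring
      rw [show ((((j:Nat) + 1 : Nat) : Int) - 1) = ((j : Nat) : Int) by push_cast; ring,
        sub_zero, ih f i (by omega) (by omega)]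
      simp [pvH, hg, Int.add_comm]
    · rw [if_neg (by simp [pvG] at hg; simp [hg])]
      simp [pvH, hg]


theorem pvRunLen_V (mat : List (List Int)) (w : Nat) :
    ∀ (i : Nat) (fuel : Nat) (j : Nat), i < fuel → j < w →
    pvRunLen mat w 1 0 fuel (i : Int) (j : Int) = pvV (pvG mat) i j := by
  intro i
  induction i with
  | zero =>
    intro fuel j hf hw
    obtain ⟨f, rfl⟩ : ∃ f, fuel = f + 1 := ⟨fuel - 1, by omega⟩
    rw [pvRunLen_succ]
    have hstop : pvRunLen mat w 1 0 f ((0 : Nat) - (1:Int)) ((j : Int) - 0) = 0 :=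
      pvRunLen_stop _ _ _ _ _ _ _ (by omega)
    by_cases hg : pvG mat 0 j = 1
    · rw [if_pos ⟨by norm_num, by positivity, by exact_mod_cast hw, by
        simpa [pvG] using hg⟩, hstop]
      simp [pvV, hg]
    · rw [if_neg (by simp [pvG] at hg; simp [hg])]
      simp [pvV, hg]
  | succ i ih =>
    intro fuel j hf hw
    obtain ⟨f, rfl⟩ : ∃ f, fuel = f + 1 := ⟨fuel - 1, by omega⟩
    rw [pvRunLen_succ]
    by_cases hg : pvG mat (i + 1) j = 1
    · rw [if_pos ⟨by positivity, by positivity, by exact_mod_cast hw, by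
        simpa [pvG] using hg⟩]
      rw [show ((((i:Nat) + 1 : Nat) : Int) - 1) = ((i : Nat) : Int) by push_cast; ring,
        sub_zero, ih f j (by omega) (by omega)]
      simp [pvV, hg, Int.add_comm]
    · rw [if_neg (by simp [pvG] at hg; simp [hg])]
      simp [pvV, hg]
theorem pvRunLen_D (mat : List (List Int)) (w : Nat) :
    ∀ (i : Nat) (fuel : Nat) (j : Nat), i < fuel → j < w →
    pvRunLen mat w 1 1 fuel (i : Int) (j : Int) = pvD (pvG mat) i j := by
  intro i
  induction i with
  | zero =>
    intro fuel j hf hw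
    obtain ⟨f, rfl⟩ : ∃ f, fuel = f + 1 := ⟨fuel - 1, by omega⟩
    rw [pvRunLen_succ]
    have hstop : pvRunLen mat w 1 1 f ((0 : Nat) - (1:Int)) ((j : Int) - 1) = 0 :=
      pvRunLen_stop _ _ _ _ _ _ _ (by omega)
    by_cases hg : pvG mat 0 j = 1
    · rw [if_pos ⟨by norm_num, by positivity, by exact_mod_cast hw, by
        simpa [pvG] using hg⟩, hstop]
      simp [pvD, hg]
    · rw [if_neg (by simp [pvG] at hg; simp [hg])]
      simp [pvD, hg]
  | succ i ih =>
    intro fuel j hf hw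
    obtain ⟨f, rfl⟩ : ∃ f, fuel = f + 1 := ⟨fuel - 1, by omega⟩
    rw [pvRunLen_succ]
    by_cases hg : pvG mat (i + 1) j = 1
    · rw [if_pos ⟨by positivity, by positivity, by exact_mod_cast hw, by
        simpa [pvG] using hg⟩]
      rw [show ((((i:Nat) + 1 : Nat) : Int) - 1) = ((i : Nat) : Int) by push_cast; ring]
      cases j with
      | zero =>
        have hstop : pvRunLen mat w 1 1 f ((i : Nat) : Int) (((0:Nat) : Int) - 1) = 0 :=
          pvRunLen_stop _ _ _ _ _ _ _ (by omega)
        rw [hstop]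
        simp [pvD, hg]
      | succ j =>
        rw [show ((((j:Nat) + 1 : Nat) : Int) - 1) = ((j : Nat) : Int) by push_cast; ring,
          ih f j (by omega) (by omega)]
        simp [pvD, hg, Int.add_comm]
    · rw [if_neg (by simp [pvG] at hg; simp [hg])]
      cases j <;> simp [pvD, hg]
theorem pvRunLen_A (mat : List (List Int)) (w : Nat) :
    ∀ (i : Nat) (fuel : Nat) (j : Nat), i < fuel → j < w →
    pvRunLen mat w 1 (-1) fuel (i : Int) (j : Int) = pvA (pvG mat) w i j := by
  intro i
  induction i with
  | zero =>
    intro fuel j hf hw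
    obtain ⟨f, rfl⟩ : ∃ f, fuel = f + 1 := ⟨fuel - 1, by omega⟩
    rw [pvRunLen_succ]
    have hstop : pvRunLen mat w 1 (-1) f ((0 : Nat) - (1:Int)) ((j : Int) - (-1)) = 0 :=
      pvRunLen_stop _ _ _ _ _ _ _ (by omega)
    by_cases hg : pvG mat 0 j = 1
    · rw [if_pos ⟨by norm_num, by positivity, by exact_mod_cast hw, by
        simpa [pvG] using hg⟩, hstop]
      simp [pvA, hg]
    · rw [if_neg (by simp [pvG] at hg; simp [hg])]
      simp [pvA, hg]
  | succ i ih =>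
    intro fuel j hf hw
    obtain ⟨f, rfl⟩ : ∃ f, fuel = f + 1 := ⟨fuel - 1, by omega⟩
    rw [pvRunLen_succ]
    by_cases hg : pvG mat (i + 1) j = 1
    · rw [if_pos ⟨by positivity, by positivity, by exact_mod_cast hw, by
        simpa [pvG] using hg⟩]
      rw [show ((((i:Nat) + 1 : Nat) : Int) - 1) = ((i : Nat) : Int) by push_cast; ring,
        show ((j : Nat) : Int) - (-1) = (((j : Nat) + 1 : Nat) : Int) by push_cast; ring]
      by_cases hj : j = w - 1
      · have hstop : pvRunLen mat w 1 (-1) f ((i : Nat) : Int) (((j + 1 : Nat)) : Int) = 0 := by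
          cases f with
          | zero => rfl
          | succ f =>
            rw [pvRunLen_succ, if_neg]
            intro ⟨_, _, h3, _⟩
            omega
        rw [hstop]
        subst hj
        simp [pvA, hg]
      · rw [ih f (j + 1) (by omega) (by omega)]
        simp [pvA, hg, hj, Int.add_comm]
    · rw [if_neg (by simp [pvG] at hg; simp [hg])]
      cases j <;> simp [pvA, hg]
theorem pvMax_eq_some_iff (xs : List Int) (m : Int) :
    PySem.List.max? xs (fun x => x) = some m ↔ (m ∈ xs ∧ ∀ y ∈ xs, y ≤ m) := by
  constructor
  · intro h
    exact ⟨PySem.List.max?_mem h, fun y hy => PySem.List.max?_isMax h y hy⟩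
  · rintro ⟨hm, hb⟩
    cases h : PySem.List.max? xs (fun x => x) with
    | none =>
      rw [PySem.List.max?_eq_none_iff] at h
      subst h; cases hm
    | some m' =>
      have h1 : m' ≤ m := hb m' (PySem.List.max?_mem h)
      have h2 : m ≤ m' := PySem.List.max?_isMax h m hm
      rw [le_antisymm h1 h2]
theorem pvMax_grouped (l : List (List Int)) (hne : ∀ x ∈ l, x ≠ []) :
    PySem.List.max? (l.map (fun x => (PySem.List.max? x (fun y => y)).getD 0)) (fun y => y)
      = PySem.List.max? l.flatten (fun y => y) := by
  cases h : PySem.List.max? l.flatten (fun y => y) with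
  | none =>
    rw [PySem.List.max?_eq_none_iff] at h ⊢
    rw [List.flatten_eq_nil_iff] at h
    cases l with
    | nil => rfl
    | cons x t => exact absurd (h x (by simp)) (hne x (by simp))
  | some m =>
    rw [pvMax_eq_some_iff] at h ⊢
    obtain ⟨hm, hb⟩ := h
    obtain ⟨x, hxl, hmx⟩ := List.mem_flatten.mp hm
    constructor
    · -- m ∈ map
      cases hx : PySem.List.max? x (fun y => y) with
      | none => rw [PySem.List.max?_eq_none_iff] at hx; subst hx; cases hmx
      | some mx =>
        obtain ⟨hmxm, hbx⟩ := (pvMax_eq_some_iff _ _).mp hx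
        have h1 : m ≤ mx := hbx m hmx
        have h2 : mx ≤ m := hb mx (List.mem_flatten.mpr ⟨x, hxl, hmxm⟩)
        have he : mx = m := le_antisymm h2 h1
        exact List.mem_map.mpr ⟨x, hxl, by rw [hx, Option.getD_some, he]⟩
    · intro y hy
      obtain ⟨x', hx'l, hx'e⟩ := List.mem_map.mp hy
      cases hx : PySem.List.max? x' (fun y => y) with
      | none => rw [PySem.List.max?_eq_none_iff] at hx; exact absurd hx (hne x' hx'l)
      | some mx' =>
        obtain ⟨hmxm, _⟩ := (pvMax_eq_some_iff _ _).mp hx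
        rw [← hx'e, hx, Option.getD_some]
        exact hb mx' (List.mem_flatten.mpr ⟨x', hx'l, hmxm⟩)
theorem eq_of_getD {α : Type} (l m : List α) (d : α) (hl : l.length = m.length)
    (h : ∀ k, k < l.length → l.getD k d = m.getD k d) : l = m := by
  apply List.ext_getElem hl
  intro k hk hk'
  have := h k hk
  rwa [List.getD_eq_getElem?_getD, List.getD_eq_getElem?_getD,
    List.getElem?_eq_getElem hk, List.getElem?_eq_getElem hk'] at this

theorem flatMap_congr' {α β : Type} (l : List α) (f g : α → List β)
    (h : ∀ x ∈ l, f x = g x) : l.flatMap f = l.flatMap g := by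
  induction l with
  | nil => rfl
  | cons x t ih =>
    rw [List.flatMap_cons, List.flatMap_cons, h x (by simp), ih (fun y hy => h y (by simp [hy]))]

theorem flatten_flatMap_map {α β γ : Type} (l : List α) (r : List β) (f : α → β → List γ) :
    (l.flatMap (fun a => r.map (f a))).flatten = l.flatMap (fun a => r.flatMap (f a)) := by
  induction l with
  | nil => rfl
  | cons x t ih =>
    rw [List.flatMap_cons, List.flatMap_cons, List.flatten_append, ih]
    congr 1

theorem pvMax_grouped' {α β : Type} (rows : List α) (cols : List β) (f : α → β → List Int)
    (hne : ∀ a b, f a b ≠ []) :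
    PySem.List.max? (rows.flatMap (fun a => cols.map (fun b =>
        (PySem.List.max? (f a b) (fun y => y)).getD 0))) (fun y => y)
      = PySem.List.max? (rows.flatMap (fun a => cols.flatMap (fun b => f a b))) (fun y => y) := by
  have h1 := pvMax_grouped (rows.flatMap (fun a => cols.map (f a))) ?hne
  · rw [List.map_flatMap] at h1
    simp only [List.map_map, Function.comp_def] at h1
    rw [flatten_flatMap_map] at h1
    exact h1
  · intro x hx
    obtain ⟨a, _, hx2⟩ := List.mem_flatMap.mp hx
    obtain ⟨b, _, rfl⟩ := List.mem_map.mp hx2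
    exact hne a b

theorem longestLine_eq_alt (mat : List (List Int)) : longestLine mat = longestLine_alt mat := by
  have htab0 : pvTab (pvG mat) mat.length mat.headI.length
      ((List.range mat.length).map (fun _ =>
        (List.range mat.headI.length).map (fun _ => ([0, 0, 0, 0] : List Int)))) 0 0 := by
    refine ⟨by simp, ?_, ?_⟩
    · intro a ha
      simp [List.getD_eq_getElem?_getD, ha]
    · intro a b ha hb
      rw [if_neg (by omega)]
      simp [List.getD_eq_getElem?_getD, ha, hb]
  have htabF := pvTab_outer mat mat.length mat.headI.length mat.length 0 (by omega) _ htab0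
  rw [← List.range_eq_range'] at htabF
  obtain ⟨h1, h2, h3⟩ := htabF
  have hdp_eq : (List.range mat.length).foldl (pvOuter mat mat.headI.length)
      ((List.range mat.length).map (fun _ =>
        (List.range mat.headI.length).map (fun _ => ([0, 0, 0, 0] : List Int))))
      = (List.range mat.length).map (fun a =>
          (List.range mat.headI.length).map (fun b => pvF (pvG mat) mat.headI.length a b)) := by
    refine eq_of_getD _ _ [] (by rw [h1, List.length_map, List.length_range]) ?_
    intro k hk
    rw [h1] at hk
    have hout : ((List.range mat.length).map (fun a =>
        (List.range mat.headI.length).map (fun b => pvF (pvG mat) mat.headI.length a b))).getD k []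
        = (List.range mat.headI.length).map (fun b => pvF (pvG mat) mat.headI.length k b) := by
      simp [List.getD_eq_getElem?_getD, hk]
    rw [hout]
    refine eq_of_getD _ _ [] (by rw [h2 k hk, List.length_map, List.length_range]) ?_
    intro b hb
    rw [h2 k hk] at hb
    rw [h3 k b hk hb, if_pos (Or.inl hk)]
    simp [List.getD_eq_getElem?_getD, hb]
  have hA : longestLine mat = (PySem.List.max?
      (((List.range mat.length).foldl (pvOuter mat mat.headI.length)
        ((List.range mat.length).map (fun _ =>
          (List.range mat.headI.length).map (fun _ => ([0, 0, 0, 0] : List Int))))).flatMap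
        (fun eles => eles.map (fun arr => (PySem.List.max? arr (fun x => x)).getD 0)))
      (fun x => x)).getD 0 := rfl
  have hB : longestLine_alt mat = (PySem.List.max?
      ((List.range mat.length).flatMap (fun (i : Nat) =>
        (List.range mat.headI.length).flatMap (fun (j : Nat) =>
          ([(0, 1), (1, 0), (1, 1), (1, -1)] : List (Int × Int)).map (fun d =>
            pvRunLen mat mat.headI.length d.1 d.2 (mat.length + mat.headI.length)
              (i : Int) (j : Int)))))
      (fun x => x)).getD 0 := by simp only [longestLine_alt]
  rw [hA, hB, hdp_eq, List.flatMap_map]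
  have hBlist : (List.range mat.length).flatMap (fun (i : Nat) =>
        (List.range mat.headI.length).flatMap (fun (j : Nat) =>
          ([(0, 1), (1, 0), (1, 1), (1, -1)] : List (Int × Int)).map (fun d =>
            pvRunLen mat mat.headI.length d.1 d.2 (mat.length + mat.headI.length)
              (i : Int) (j : Int))))
      = (List.range mat.length).flatMap (fun (i : Nat) =>
          (List.range mat.headI.length).flatMap (fun (j : Nat) => pvF (pvG mat) mat.headI.length i j)) := by
    refine flatMap_congr' _ _ _ ?_
    intro i hi
    rw [List.mem_range] at hi
    refine flatMap_congr' _ _ _ ?_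
    intro j hj
    rw [List.mem_range] at hj
    have hH := pvRunLen_H mat mat.headI.length j (mat.length + mat.headI.length) i (by omega) hj
    have hV := pvRunLen_V mat mat.headI.length i (mat.length + mat.headI.length) j (by omega) hj
    have hD := pvRunLen_D mat mat.headI.length i (mat.length + mat.headI.length) j (by omega) hj
    have hAd := pvRunLen_A mat mat.headI.length i (mat.length + mat.headI.length) j (by omega) hj
    simp only [List.map_cons, List.map_nil]
    rw [pvF]
    norm_num [hH, hV, hD, hAd]
  rw [hBlist]
  have := pvMax_grouped' (List.range mat.length) (List.range mat.headI.length)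
    (fun a b => pvF (pvG mat) mat.headI.length a b) (fun a b => by simp [pvF])
  simp only [List.map_map, Function.comp_def]
  rw [this]

-- ===== VERDICT (by name: the statement is the Claim_ definition above) =====
theorem longestLine_spec : Claim_equal_longestLine := by
  intro mat _ _
  unfold Spec_longestLine
  exact longestLine_eq_alt mat
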